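-- pv_equiv track=rewrite | github.com/NurAhmadullah/Image-steganography | myFunction.py | get_pos_array
-- ===== SOURCE A (Python) =====
-- def txt_to_bin(txt):
--     txt_bit = ""
--     for x in txt:
--         b = format(ord(x),'b')
--         dst = 8 - len(b)
--         b = '0'*dst + b
--         txt_bit += b
--     return txt_bit
--
-- def get_pos_array(txt):
--     txt_bit = txt_to_bin(txt)
--
--     pos_array = []
--     cntr = 0
--     pos = 0
--     for c in txt_bit:
--         x = ord(c) - ord('0')
--         cntr += 1
--         p = 3 - cntr
--         pos += x * (2**p)
--         if cntr == 3:
--             if pos == 0: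
--                 pos = 7
--             pos_array.append(pos)
--             cntr = 0
--             pos = 0
--     return pos_array
-- ===== SOURCE B (Python) =====
-- def get_pos_array(txt):
--     bits = ''.join(format(ord(x), '08b') for x in txt)
--     out = []
--     i = 0
--     while i + 3 <= len(bits):
--         v = int(bits[i:i + 3], 2)
--         out.append(v if v else 7)
--         i += 3
--     return out
-- ===== Notes on version B (the rewrite author's own statement) =====
-- stated objective: simpler
-- what changed: Replaced the bit-by-bit fold carrying (counter, running accumulator) state by building the padded bit string once and decoding it with a single index loop over 3-bit slices (int(bits[i:i+3],2) or 7 fallback), which drops the incomplete trailing bits automatically.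
import Mathlib
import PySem

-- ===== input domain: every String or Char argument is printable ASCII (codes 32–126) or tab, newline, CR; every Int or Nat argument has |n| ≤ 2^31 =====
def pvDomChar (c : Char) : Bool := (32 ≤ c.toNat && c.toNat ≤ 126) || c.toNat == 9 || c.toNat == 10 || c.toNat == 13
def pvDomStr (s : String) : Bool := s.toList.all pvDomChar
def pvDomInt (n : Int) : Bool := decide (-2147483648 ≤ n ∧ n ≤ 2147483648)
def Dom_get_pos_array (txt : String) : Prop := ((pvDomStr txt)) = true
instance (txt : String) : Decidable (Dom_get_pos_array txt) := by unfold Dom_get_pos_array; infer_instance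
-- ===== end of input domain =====

-- B replaces A's bit-by-bit accumulator with a mod-3 counter by a single index loop over
-- triplet slices of the bit string (objective: simpler; same asymptotic cost).

-- ===== PORT A =====
-- format(n,'b') (binary, no leading zeros; '0' for 0)
def pvBinCore : Nat → List Char
  | 0 => []
  | n+1 => pvBinCore ((n+1)/2) ++ [Char.ofNat (48 + (n+1) % 2)]

def pvBin (n : Nat) : List Char := if n = 0 then ['0'] else pvBinCore n

def txt_to_bin (txt : String) : List Char :=
  txt.toList.foldl (fun acc x =>
    let b := pvBin x.toNat
    let dst := 8 - b.length
    acc ++ (List.replicate dst '0' ++ b)) []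

-- one iteration of A's for-loop; state = (pos_array, cntr, pos)
def pvAStep (s : List Int × Int × Int) (c : Char) : List Int × Int × Int :=
  let x : Int := (c.toNat : Int) - 48
  let cntr := s.2.1 + 1
  let p := 3 - cntr
  let pos := s.2.2 + x * 2 ^ p.toNat   -- p is always 0,1,2 here, so toNat is exact
  if cntr == 3 then
    (s.1 ++ [if pos == 0 then (7 : Int) else pos], 0, 0)
  else
    (s.1, cntr, pos)

def get_pos_array (txt : String) : List Int :=
  ((txt_to_bin txt).foldl pvAStep ([], 0, 0)).1

-- ===== PORT B =====
-- format(ord(x), '08b'): binary digits zero-padded to width 8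
def pvByte8 (x : Char) : List Char :=
  let b := pvBin x.toNat
  List.replicate (8 - b.length) '0' ++ b

-- int(s, 2) on a string of '0'/'1' digits (hand port; exact on such strings)
def pvInt2 (s : List Char) : Int :=
  s.foldl (fun a c => 2 * a + ((c.toNat : Int) - 48)) 0

-- B's while loop: index i advances by 3 while i + 3 <= len(bits)
def pvBLoop (bits : List Char) (i : Nat) : List Int :=
  if i + 3 ≤ bits.length then
    let v := pvInt2 (PySem.List.slice bits (some (i : Int)) (some ((i : Int) + 3)))
    (if v == 0 then (7 : Int) else v) :: pvBLoop bits (i + 3)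
  else []
termination_by bits.length - i

def get_pos_array_alt (txt : String) : List Int :=
  pvBLoop (txt.toList.flatMap pvByte8) 0

-- ===== PRECONDITION & SPEC =====
def Spec_get_pos_array (txt : String) (out : List Int) : Prop := out = get_pos_array_alt txt
instance (txt : String) (out : List Int) : Decidable (Spec_get_pos_array txt out) := by unfold Spec_get_pos_array; infer_instance

-- ===== CLAIM (what is proved, stated in full; the proofs are below) =====
def Claim_equal_get_pos_array : Prop := ∀ (txt : String), Dom_get_pos_array txt → Spec_get_pos_array txt (get_pos_array txt)

-- ===== LEMMAS AND PROOFS =====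

-- common specification: the bit list chopped into complete triplets
def pvChunk3 : List Char → List Int
  | a :: b :: c :: rest =>
      (let v := pvInt2 [a, b, c]; if v == 0 then (7 : Int) else v) :: pvChunk3 rest
  | _ => []

lemma pvA_fold_eq_chunk3 (bs : List Char) :
    ∀ acc : List Int, (bs.foldl pvAStep (acc, 0, 0)).1 = acc ++ pvChunk3 bs := by
  induction bs using pvChunk3.induct with
  | case1 a b c rest ih =>
      intro acc
      have h3 : pvAStep (pvAStep (pvAStep (acc, 0, 0) a) b) c
          = (acc ++ [if ((a.toNat : Int) - 48) * 4 + ((b.toNat : Int) - 48) * 2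
                        + ((c.toNat : Int) - 48) == 0 then (7 : Int)
                     else ((a.toNat : Int) - 48) * 4 + ((b.toNat : Int) - 48) * 2
                        + ((c.toNat : Int) - 48)], 0, 0) := by
        simp [pvAStep]
      have hv : ((a.toNat : Int) - 48) * 4 + ((b.toNat : Int) - 48) * 2
          + ((c.toNat : Int) - 48) = pvInt2 [a, b, c] := by
        simp [pvInt2]; ring
      simp only [List.foldl, h3, hv, ih]
      simp [pvChunk3]
  | case2 bs h =>
      intro acc
      match bs with
      | [] => simp [pvChunk3]
      | [a] => simp [pvChunk3, pvAStep]
      | [a, b] =>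
          simp only [List.foldl]
          simp [pvChunk3, pvAStep]
      | a :: b :: c :: rest => exact (h a b c rest rfl).elim

lemma pvBLoop_eq_chunk3 (bits : List Char) (i : Nat) :
    pvBLoop bits i = pvChunk3 (bits.drop i) := by
  induction i using pvBLoop.induct (bits := bits) with
  | case1 i h ih =>
      have hlen : 3 ≤ (bits.drop i).length := by
        simp [List.length_drop]; omega
      rw [pvBLoop]
      simp only [if_pos h]
      rcases hd : bits.drop i with _ | ⟨a, _ | ⟨b, _ | ⟨c, t⟩⟩⟩ <;>
        rw [hd] at hlen <;> try (simp at hlen)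
      have hslice : PySem.List.slice bits (some (i : Int)) (some ((i : Int) + 3))
          = [a, b, c] := by
        have hs := PySem.List.slice_natCast_add (xs := bits) (j := i) (n := 3)
        push_cast at hs
        rw [hs, hd]
        rfl
      have ht : bits.drop (i + 3) = t := by
        have hdd : (bits.drop i).drop 3 = bits.drop (i + 3) := by
          rw [List.drop_drop]
        rw [← hdd, hd]
        rfl
      simp only [pvChunk3, hslice, ih, ht]
  | case2 i h =>
      rw [pvBLoop]
      simp only [if_neg h]
      have hlen : (bits.drop i).length < 3 := by
        simp [List.length_drop]; omega
      rcases hd : bits.drop i with _ | ⟨a, _ | ⟨b, _ | ⟨c, t⟩⟩⟩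
      · rfl
      · rfl
      · rfl
      · rw [hd] at hlen
        simp only [List.length_cons] at hlen
        omega

lemma pv_bits_eq (txt : String) : txt_to_bin txt = txt.toList.flatMap pvByte8 := by
  unfold txt_to_bin pvByte8
  exact PySem.List.foldl_append_eq_flatMap _ _ _

-- ===== VERDICT (by name: the statement is the Claim_ definition above) =====
theorem get_pos_array_spec : Claim_equal_get_pos_array := by
  intro txt _
  unfold Spec_get_pos_array get_pos_array get_pos_array_alt
  rw [pv_bits_eq, pvA_fold_eq_chunk3, pvBLoop_eq_chunk3]
  simp
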